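-- pv_equiv track=rewrite | github.com/KNIGHTTH0R/decode-ingress-bot | tools/rectangles.py | reverse_rows
-- ===== SOURCE A (Python) =====
-- def reverse(s):
--     """Reverse string or flip rectangle"""
--     return s[::-1]
--
-- def reverse_rows(l, odd=False, even=False):
--     result = []
--     for k, v in enumerate(l):
--         if k % 2 == 0:
--             result.append(reverse(v) if even else v)
--         else:
--             result.append(reverse(v) if odd else v)
--     return result
-- ===== SOURCE B (Python) =====
-- def reverse_rows(l, odd=False, even=False):
--     evens = l[::2]
--     odds = l[1::2]
--     if even:
--         evens = [v[::-1] for v in evens]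
--     if odd:
--         odds = [v[::-1] for v in odds]
--     result = []
--     for e, o in zip(evens, odds):
--         result += [e, o]
--     if len(odds) < len(evens):
--         result.append(evens[-1])
--     return result
-- ===== Notes on version B (the rewrite author's own statement) =====
-- stated objective: alternative
-- what changed: B replaces A's single enumerate + index-parity pass with a staged slice decomposition: split l into the strided parity subsequences l[::2] and l[1::2], bulk-transform each whole subsequence under its flag, then interleave the two streams back with zip (plus the trailing even element for odd length).
import Mathlib
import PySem

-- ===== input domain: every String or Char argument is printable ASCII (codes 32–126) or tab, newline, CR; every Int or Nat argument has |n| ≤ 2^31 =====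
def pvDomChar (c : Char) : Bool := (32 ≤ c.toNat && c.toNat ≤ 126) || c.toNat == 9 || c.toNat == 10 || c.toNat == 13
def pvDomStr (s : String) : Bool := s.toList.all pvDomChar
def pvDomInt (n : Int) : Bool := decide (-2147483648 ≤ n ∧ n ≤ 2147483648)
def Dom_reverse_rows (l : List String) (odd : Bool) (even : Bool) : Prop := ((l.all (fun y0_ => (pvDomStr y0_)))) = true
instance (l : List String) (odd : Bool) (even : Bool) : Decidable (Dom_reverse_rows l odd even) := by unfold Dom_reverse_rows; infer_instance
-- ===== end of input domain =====

-- B replaces A's single enumerate + index-parity pass by a staged slice decomposition: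
-- split into the parity subsequences l[::2] / l[1::2], bulk-transform each under its
-- flag, then interleave them back; objective: alternative (same O(n) cost).
-- ===== PORT A =====
-- reverse(s) = s[::-1]
def pyrev (s : String) : String := (PySem.Str.slice? s none none (-1)).getD ""

def reverse_rows (l : List String) (odd : Bool) (even : Bool) : List String :=
  (PySem.List.enumerate l).foldl (fun result kv =>
    if PySem.Int.mod kv.1 2 = 0 then
      result ++ [if even then pyrev kv.2 else kv.2]
    else
      result ++ [if odd then pyrev kv.2 else kv.2]) []

-- ===== PORT B =====
-- Source B: evens = l[::2]; odds = l[1::2]; bulk map under the flags; interleave with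
-- zip (two appends per pair); trailing even element if len(odds) < len(evens)
def reverse_rows_alt (l : List String) (odd : Bool) (even : Bool) : List String :=
  let evens0 := (PySem.List.slice? l none none 2).getD []
  let odds0 := (PySem.List.slice? l (some 1) none 2).getD []
  let evens := if even then evens0.map pyrev else evens0
  let odds := if odd then odds0.map pyrev else odds0
  let result := (evens.zip odds).foldl (fun r p => r ++ [p.1, p.2]) []
  if odds.length < evens.length then result ++ [PySem.List.pyGetD evens (-1) ""] else result

-- ===== PRECONDITION & SPEC =====
def Spec_reverse_rows (l : List String) (odd : Bool) (even : Bool) (out : List String) : Prop := out = reverse_rows_alt l odd even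
instance (l : List String) (odd : Bool) (even : Bool) (out : List String) : Decidable (Spec_reverse_rows l odd even out) := by unfold Spec_reverse_rows; infer_instance

-- ===== CLAIM (what is proved, stated in full; the proofs are below) =====
def Claim_equal_reverse_rows : Prop := ∀ (l : List String) (odd : Bool) (even : Bool), Dom_reverse_rows l odd even → Spec_reverse_rows l odd even (reverse_rows l odd even)

-- ===== LEMMAS AND PROOFS =====

-- A's body as a map over the enumeration
theorem reverse_rows_eq_map (l : List String) (odd even : Bool) (s : Int) :
    (PySem.List.enumerate l s).foldl (fun result kv =>
      if PySem.Int.mod kv.1 2 = 0 then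
        result ++ [if even then pyrev kv.2 else kv.2]
      else
        result ++ [if odd then pyrev kv.2 else kv.2]) []
    = (PySem.List.enumerate l s).map (fun kv =>
        if PySem.Int.mod kv.1 2 = 0 then (if even then pyrev kv.2 else kv.2)
        else (if odd then pyrev kv.2 else kv.2)) := by
  have h := PySem.List.foldl_append_singleton_eq_map
    (l := PySem.List.enumerate l s)
    (f := fun kv : Int × String =>
      if PySem.Int.mod kv.1 2 = 0 then (if even then pyrev kv.2 else kv.2)
      else (if odd then pyrev kv.2 else kv.2)) (acc := [])
  rw [show (fun (result : List String) (kv : Int × String) =>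
      if PySem.Int.mod kv.1 2 = 0 then result ++ [if even then pyrev kv.2 else kv.2]
      else result ++ [if odd then pyrev kv.2 else kv.2])
    = (fun result kv =>
      result ++ [if PySem.Int.mod kv.1 2 = 0 then (if even then pyrev kv.2 else kv.2)
                 else (if odd then pyrev kv.2 else kv.2)]) from by
        funext acc kv
        split_ifs <;> rfl]
  simpa using h

-- the map only depends on index parity, so shifting the start by 2 changes nothing
theorem map_enumerate_shift (l : List String) (odd even : Bool) (s : Int) :
    (PySem.List.enumerate l (s + 2)).map (fun kv =>
        if PySem.Int.mod kv.1 2 = 0 then (if even then pyrev kv.2 else kv.2)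
        else (if odd then pyrev kv.2 else kv.2))
    = (PySem.List.enumerate l s).map (fun kv =>
        if PySem.Int.mod kv.1 2 = 0 then (if even then pyrev kv.2 else kv.2)
        else (if odd then pyrev kv.2 else kv.2)) := by
  induction l generalizing s with
  | nil => simp [PySem.List.enumerate_nil]
  | cons x xs ih =>
    have hmod : PySem.Int.mod (s + 2) 2 = PySem.Int.mod s 2 := by
      have h1 := PySem.Int.mod_eq_emod_of_pos (a := s + 2) (b := 2) (by norm_num)
      have h2 := PySem.Int.mod_eq_emod_of_pos (a := s) (b := 2) (by norm_num)
      rw [h1, h2]; omega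
    have ih' := ih (s + 1)
    simp only [PySem.List.enumerate_cons, List.map_cons, hmod]
    rw [show s + 2 + 1 = s + 1 + 2 by ring, ih']

-- proof-side characterisation: A's output, two elements at a time
def pairs (odd even : Bool) : List String → List String
  | [] => []
  | [x] => [if even then pyrev x else x]
  | x :: y :: rest =>
      (if even then pyrev x else x) :: (if odd then pyrev y else y) :: pairs odd even rest

theorem map_enumerate_eq_pairs (l : List String) (odd even : Bool) :
    (PySem.List.enumerate l 0).map (fun kv =>
        if PySem.Int.mod kv.1 2 = 0 then (if even then pyrev kv.2 else kv.2)
        else (if odd then pyrev kv.2 else kv.2))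
    = pairs odd even l := by
  induction l using pairs.induct with
  | case1 => simp [PySem.List.enumerate_nil, pairs]
  | case2 x =>
    simp [PySem.List.enumerate_cons, PySem.List.enumerate_nil, pairs, PySem.Int.mod]
  | case3 x y rest ih =>
    have hshift := map_enumerate_shift rest odd even 0
    simp only [PySem.List.enumerate_cons, List.map_cons, pairs]
    rw [show (0 : Int) + 1 + 1 = 0 + 2 by ring, hshift, ih]
    norm_num [PySem.Int.mod_eq_emod_of_pos]

-- the strided subsequence l[::2] as a structural recursion
def everyOther {α : Type} : List α → List α
  | [] => []
  | [x] => [x]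
  | x :: _ :: rest => x :: everyOther rest

theorem fm_succ {α : Type} (x y : α) (rest : List α) (n : Nat) :
    List.filterMap (fun k : Nat => (x :: y :: rest)[2 * k]?) (List.range (n+1))
      = x :: List.filterMap (fun k : Nat => rest[2 * k]?) (List.range n) := by
  rw [List.range_succ_eq_map]
  simp [List.filterMap_map, Nat.mul_succ]

theorem fm_every {α : Type} (xs : List α) :
    List.filterMap (fun k : Nat => xs[2 * k]?) (List.range ((xs.length + 1)/2))
      = everyOther xs := by
  induction xs using everyOther.induct with
  | case1 => simp [everyOther]
  | case2 x => simp [everyOther]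
  | case3 x y rest ih =>
    have hc : (x :: y :: rest).length + 1 = (rest.length + 1) + 2 := by simp
    rw [hc, show ((rest.length + 1) + 2)/2 = (rest.length+1)/2 + 1 by omega, fm_succ, ih,
      everyOther]

-- l[::2] is everyOther l
theorem slice2_eq {α : Type} (xs : List α) :
    PySem.List.slice? xs none none 2 = some (everyOther xs) := by
  simp only [PySem.List.slice?, PySem.List.sliceIndices]
  norm_num
  have hc : (if 0 < xs.length then (((xs.length:Int) + 2 - 1) / 2).toNat else 0)
      = (xs.length + 1)/2 := by split <;> omega
  rw [hc, show (fun k : Nat => xs[(2 * (k:Int)).toNat]?) = (fun k : Nat => xs[2 * k]?) from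
    funext fun k => by rw [show ((2 * (k:Int)).toNat) = 2 * k by omega], fm_every]

-- l[1::2] is everyOther of the tail
theorem slice2_tail {α : Type} (xs : List α) :
    PySem.List.slice? xs (some 1) none 2 = some (everyOther xs.tail) := by
  cases xs with
  | nil => simp [PySem.List.slice?, PySem.List.sliceIndices, everyOther]
  | cons x rest =>
    simp only [PySem.List.slice?, PySem.List.sliceIndices]
    norm_num
    have hc : (if 0 < rest.length then (((rest.length:Int) + 2 - 1) / 2).toNat else 0)
        = (rest.length + 1)/2 := by split <;> omega
    rw [hc, show (fun k : Nat => (x :: rest)[(1 + 2 * (k:Int)).toNat]?)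
        = (fun k : Nat => rest[2 * k]?) from funext fun k => by
          rw [show ((1 + 2 * (k:Int)).toNat) = 2*k + 1 by omega]; rfl, fm_every]

-- B's merge step (zip-interleave + trailing element), as used by the proofs
def mrg (es os : List String) : List String :=
  let r := (es.zip os).foldl (fun r p => r ++ [p.1, p.2]) []
  if os.length < es.length then r ++ [PySem.List.pyGetD es (-1) ""] else r

theorem everyOther_cons {α : Type} (y : α) (rest : List α) :
    everyOther (y :: rest) = y :: everyOther rest.tail := by
  cases rest <;> simp [everyOther]

theorem mrg_cons (e o : String) (es os : List String) :
    mrg (e :: es) (o :: os) = e :: o :: mrg es os := by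
  unfold mrg
  simp only [List.zip_cons_cons, List.foldl_cons, List.length_cons,
    PySem.List.foldl_append_eq_flatMap, List.nil_append, add_lt_add_iff_right]
  split_ifs with h
  · have hne : es ≠ [] := by intro he; subst he; simp at h
    rw [PySem.List.pyGetD_neg_one (e :: es) "" (by simp),
        PySem.List.pyGetD_neg_one es "" hne, List.getLast_cons hne]
    simp
  · simp

theorem interleave_eq_pairs (odd even : Bool) (l : List String) :
    mrg (if even then (everyOther l).map pyrev else everyOther l)
        (if odd then (everyOther l.tail).map pyrev else everyOther l.tail)
      = pairs odd even l := by
  induction l using pairs.induct with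
  | case1 => cases even <;> cases odd <;> simp [mrg, everyOther, pairs]
  | case2 x =>
    cases even <;> cases odd <;>
      simp [mrg, everyOther, pairs, PySem.List.pyGetD_neg_one]
  | case3 x y rest ih =>
    have h1 : everyOther (x :: y :: rest) = x :: everyOther rest := rfl
    have h2 : everyOther ((x :: y :: rest).tail) = y :: everyOther rest.tail := by
      simp only [List.tail_cons]; exact everyOther_cons y rest
    rw [h1, h2]
    have hsE : (if even then (x :: everyOther rest).map pyrev else x :: everyOther rest)
        = (if even then pyrev x else x) ::
          (if even then (everyOther rest).map pyrev else everyOther rest) := by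
      cases even <;> simp
    have hsO : (if odd then (y :: everyOther rest.tail).map pyrev
          else y :: everyOther rest.tail)
        = (if odd then pyrev y else y) ::
          (if odd then (everyOther rest.tail).map pyrev else everyOther rest.tail) := by
      cases odd <;> simp
    rw [hsE, hsO, mrg_cons, ih]
    rfl

-- ===== VERDICT =====
theorem reverse_rows_spec : Claim_equal_reverse_rows := by
  intro l odd even _
  unfold Spec_reverse_rows reverse_rows
  rw [reverse_rows_eq_map, map_enumerate_eq_pairs]
  show _ = reverse_rows_alt l odd even
  unfold reverse_rows_alt
  rw [slice2_eq, slice2_tail]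
  simp only [Option.getD_some]
  exact (interleave_eq_pairs odd even l).symm
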